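-- pv_equiv track=rewrite | github.com/Git-Yuya/atcoder | ABC412/C_Giant-Domino.py | find_min_domino
-- ===== SOURCE A (Python) =====
-- def find_min_domino(s_list: list[int]) -> int:
--     """
--     最小のドミノの個数を探索
--
--     Args:
--         s_list (list[int]): 各ドミノの大きさ
--
--     Returns:
--         min_domino (int): 最小のドミノの個数、または存在しない場合は-1
--     """
--     # 最小のドミノの個数
--     min_domino = 2
--     # 現在一番左のドミノの大きさ
--     s_current = s_list[0]
--     # ドミノnの大きさ
--     s_n = s_list[-1]
--     # ドミノの大きさリスト
--     s_list = s_list[1:]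
--     s_list.sort()
--
--     while 2 * s_current < s_n:
--         # 倒れるドミノ候補の大きさ
--         s_candidate_list = []
--         # ドミノリスト更新のためのインデックス
--         index = 0
--
--         # 倒れるドミノ候補を探索
--         for s in s_list:
--             if s <= 2 * s_current:
--                 s_candidate_list.append(s)
--                 index += 1
--
--         # 倒れるドミノがない場合
--         if s_candidate_list == []:
--             return -1
--
--         # 倒れるドミノがある場合
--         else:
--             s_current = max(s_candidate_list)
--             s_list = s_list[index:]
--             min_domino += 1
--
--     return min_domino
-- ===== SOURCE B (Python) =====
-- def find_min_domino(s_list: list[int]) -> int: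
--     """Same result as A: sort the tail once, then sweep one monotone pointer
--     across it instead of re-filtering and re-slicing the list on every step."""
--     s_n = s_list[-1]
--     reach = s_list[0]
--     rest = sorted(s_list[1:])
--     n = len(rest)
--     ptr = 0
--     count = 2
--     while 2 * reach < s_n:
--         j = ptr
--         while j < n and rest[j] <= 2 * reach:
--             j += 1
--         if j == ptr:
--             return -1
--         reach = rest[j - 1]
--         ptr = j
--         count += 1
--     return count
-- ===== Notes on version B (the rewrite author's own statement) =====
-- stated objective: alternative
-- what changed: A re-filters the whole remaining list, takes max() of the candidates and re-slices the list on every step of the chain; B sorts the tail once and sweeps a single monotone pointer across the fixed sorted array, reading the element just before the pointer as the new reach.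
import Mathlib
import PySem

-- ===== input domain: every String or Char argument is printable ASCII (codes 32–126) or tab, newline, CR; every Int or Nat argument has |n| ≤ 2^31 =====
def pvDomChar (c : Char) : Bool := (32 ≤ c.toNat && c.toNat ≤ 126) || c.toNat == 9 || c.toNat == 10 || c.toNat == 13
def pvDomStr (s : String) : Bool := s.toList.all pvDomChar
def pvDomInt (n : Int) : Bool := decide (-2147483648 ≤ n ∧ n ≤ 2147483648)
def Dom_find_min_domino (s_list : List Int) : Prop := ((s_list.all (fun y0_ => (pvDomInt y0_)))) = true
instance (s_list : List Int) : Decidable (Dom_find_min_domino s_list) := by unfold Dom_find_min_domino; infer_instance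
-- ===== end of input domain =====

-- B sorts the tail once and sweeps one monotone pointer over it instead of
-- re-filtering and re-slicing the remaining list on every step (objective: alternative).


-- ===== PORT A =====
-- A's for-loop over the remaining list, with its two accumulators
-- (s_candidate_list, index), characterised once; aLoop's termination cites it.
def aScan (b : Int) (l : List Int) : List Int × Int :=
  l.foldl (fun (p : List Int × Int) s => if s ≤ b then (p.1 ++ [s], p.2 + 1) else p) ([], 0)

theorem aScan_spec (b : Int) (l : List Int) :
    aScan b l = (l.filter (fun s => decide (s ≤ b)),
      (l.countP (fun s => decide (s ≤ b)) : Int)) := by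
  suffices h : ∀ (acc : List Int) (i : Int),
      l.foldl (fun (p : List Int × Int) s => if s ≤ b then (p.1 ++ [s], p.2 + 1) else p) (acc, i)
        = (acc ++ l.filter (fun s => decide (s ≤ b)),
           i + (l.countP (fun s => decide (s ≤ b)) : Int)) by
    simpa [aScan] using h [] 0
  induction l with
  | nil => simp
  | cons a l ih =>
    intro acc i
    by_cases h : a ≤ b
    · simp only [List.foldl_cons, h, if_true, ih, List.filter_cons, List.countP_cons,
        decide_true, List.append_assoc, List.singleton_append, Prod.mk.injEq]
      refine ⟨by simp, ?_⟩
      push_cast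
      ring
    · simp [List.foldl_cons, h, ih]

-- the while loop of A: state = (s_current, remaining s_list, min_domino)
def aLoop (s_n s_current : Int) (s_list : List Int) (min_domino : Int) : Int :=
  if 2 * s_current < s_n then
    let st := aScan (2 * s_current) s_list
    if st.1 = [] then -1
    else
      match PySem.List.max? st.1 (fun x => x) with
      | some m => aLoop s_n m (PySem.List.slice s_list (some st.2) none) (min_domino + 1)
      | none => -1   -- unreachable: st.1 ≠ []
  else min_domino
termination_by s_list.length
decreasing_by
  rw [aScan_spec] at *
  rename_i hne
  have hne0 : ¬ (aScan (2 * s_current) s_list).1 = [] := hne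
  rw [aScan_spec] at hne0
  have hne' : ¬ s_list.filter (fun s => decide (s ≤ 2 * s_current)) = [] := hne0
  have hc1 : 1 ≤ s_list.countP (fun s => decide (s ≤ 2 * s_current)) := by
    rcases Nat.eq_zero_or_pos (s_list.countP (fun s => decide (s ≤ 2 * s_current))) with h0 | h1
    · rw [List.countP_eq_length_filter] at h0
      exact absurd (List.length_eq_zero_iff.mp h0) hne'
    · exact h1
  have hcl : s_list.countP (fun s => decide (s ≤ 2 * s_current)) ≤ s_list.length :=
    List.countP_le_length
  rw [PySem.List.slice_from_natCast]
  simp only [List.length_drop]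
  omega

def find_min_domino (s_list : List Int) : Int :=
  match PySem.List.pyGet? s_list 0, PySem.List.pyGet? s_list (-1) with
  | some s_current, some s_n =>
      aLoop s_n s_current
        (PySem.List.sorted (PySem.List.slice s_list (some 1) none) (fun x => x) false) 2
  | _, _ => -1   -- IndexError in Python (empty list); excluded by Pre_

-- ===== PORT B =====
-- the inner 'while j < n and rest[j] <= bound: j += 1'
def bAdvance (rest : List Int) (n : Nat) (bound : Int) (j : Nat) : Nat :=
  if h : j < n ∧ rest.getD j 0 ≤ bound then bAdvance rest n bound (j + 1) else j
termination_by n - j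
decreasing_by omega

-- lower bound on bAdvance; cited by bLoop's termination via bAdvance_exit
theorem bAdvance_ge (rest : List Int) (n : Nat) (bound : Int) (j : Nat) :
    j ≤ bAdvance rest n bound j := by
  rw [bAdvance]
  split
  · exact le_trans (by omega) (bAdvance_ge rest n bound (j + 1))
  · exact le_refl j
termination_by n - j
decreasing_by rename_i h; omega

theorem bAdvance_exit (rest : List Int) (n : Nat) (bound : Int) (j : Nat)
    (hne : bAdvance rest n bound j ≠ j) : j < n ∧ j + 1 ≤ bAdvance rest n bound j := by
  rw [bAdvance] at hne ⊢
  split at hne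
  · rename_i h
    rw [dif_pos h]
    exact ⟨h.1, bAdvance_ge rest n bound (j + 1)⟩
  · exact absurd rfl hne

-- the outer while loop of B: state = (reach, ptr, count)
def bLoop (rest : List Int) (n : Nat) (s_n reach : Int) (ptr : Nat) (count : Int) : Int :=
  if 2 * reach < s_n then
    let j := bAdvance rest n (2 * reach) ptr
    if j = ptr then -1
    else bLoop rest n s_n (rest.getD (j - 1) 0) j (count + 1)
  else count
termination_by n - ptr
decreasing_by
  rename_i hne
  have := bAdvance_exit rest n (2 * reach) ptr hne
  omega

def find_min_domino_alt (s_list : List Int) : Int :=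
  match PySem.List.pyGet? s_list (-1) with
  | none => -1   -- IndexError in Python (empty list); excluded by Pre_
  | some s_n =>
    match PySem.List.pyGet? s_list 0 with
    | none => -1   -- unreachable when s_list ≠ []
    | some reach =>
      let rest := PySem.List.sorted (PySem.List.slice s_list (some 1) none) (fun x => x) false
      bLoop rest rest.length s_n reach 0 2

-- ===== PRECONDITION & SPEC =====
-- Python A raises IndexError on the empty list (s_list[0]); B raises there too.
def Pre_find_min_domino (s_list : List Int) : Prop := s_list ≠ []
instance (s_list : List Int) : Decidable (Pre_find_min_domino s_list) := by
  unfold Pre_find_min_domino; infer_instance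
def pvWitness_find_min_domino : List Int := [1, 2]

def Spec_find_min_domino (s_list : List Int) (out : Int) : Prop := out = find_min_domino_alt s_list
instance (s_list : List Int) (out : Int) : Decidable (Spec_find_min_domino s_list out) := by
  unfold Spec_find_min_domino; infer_instance

-- ===== CLAIM (what is proved, stated in full; the proofs are below) =====
def Claim_equal_find_min_domino : Prop := ∀ (s_list : List Int), Dom_find_min_domino s_list → Pre_find_min_domino s_list → Spec_find_min_domino s_list (find_min_domino s_list)

-- ===== LEMMAS AND PROOFS =====

-- on a (≤)-sorted list the elements ≤ b are exactly a prefix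
theorem filter_eq_takeWhile_of_sorted (b : Int) (l : List Int)
    (h : l.Pairwise (· ≤ ·)) :
    l.filter (fun s => decide (s ≤ b)) = l.takeWhile (fun s => decide (s ≤ b)) := by
  induction l with
  | nil => rfl
  | cons a l ih =>
    rcases List.pairwise_cons.mp h with ⟨ha, hl⟩
    by_cases hab : a ≤ b
    · simp [hab, ih hl]
    · simp only [List.filter_cons, List.takeWhile_cons, hab, decide_false]
      simp only [Bool.false_eq_true, if_false]
      rw [List.filter_eq_nil_iff.mpr]
      intro x hx
      simp only [decide_eq_true_eq]
      intro hxb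
      exact hab (le_trans (ha x hx) hxb)

-- bAdvance computes ptr + length of the ≤-bound prefix of the unseen suffix
theorem bAdvance_eq (rest : List Int) (bound : Int) (j : Nat) :
    bAdvance rest rest.length bound j
      = j + ((rest.drop j).takeWhile (fun s => decide (s ≤ bound))).length := by
  rw [bAdvance]
  by_cases h : j < rest.length ∧ rest.getD j 0 ≤ bound
  · rw [dif_pos h, bAdvance_eq rest bound (j + 1)]
    have hdrop : rest.drop j = rest[j] :: rest.drop (j + 1) :=
      List.drop_eq_getElem_cons h.1
    rw [hdrop, List.takeWhile_cons]
    have : rest.getD j 0 = rest[j] := List.getD_eq_getElem rest 0 h.1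
    rw [this] at h
    simp only [h.2, decide_true, if_true, List.length_cons]
    omega
  · rw [dif_neg h]
    rcases Nat.lt_or_ge j rest.length with hj | hj
    · have : rest.getD j 0 = rest[j] := List.getD_eq_getElem rest 0 hj
      have hnb : ¬ rest[j] ≤ bound := by
        intro hb; exact h ⟨hj, by rw [this]; exact hb⟩
      rw [List.drop_eq_getElem_cons hj, List.takeWhile_cons]
      simp [hnb]
    · rw [List.drop_eq_nil_of_le hj]
      simp
termination_by rest.length - j
decreasing_by omega

-- the last element of a (≤)-sorted nonempty list bounds every element
theorem le_getLast_of_sorted :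
    ∀ (l : List Int), l.Pairwise (· ≤ ·) → ∀ (hne : l ≠ []), ∀ y ∈ l, y ≤ l.getLast hne := by
  intro l
  induction l with
  | nil => intro _ hne; exact absurd rfl hne
  | cons a l ih =>
    intro h hne y hy
    rcases List.pairwise_cons.mp h with ⟨ha, hl⟩
    cases l with
    | nil => simp at hy; simp [hy]
    | cons c t =>
      rw [List.getLast_cons (by simp)]
      rcases List.mem_cons.mp hy with rfl | hy'
      · exact le_trans (ha _ (List.getLast_mem (by simp))) (le_refl _)
      · exact ih hl (by simp) y hy'

-- the two loops coincide: A's remaining list is the suffix of B's fixed sorted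
-- list starting at B's pointer
theorem loop_eq (rest : List Int) (hs : rest.Pairwise (· ≤ ·)) :
    ∀ (k ptr : Nat), rest.length - ptr ≤ k → ∀ (s_n reach cnt : Int),
      aLoop s_n reach (rest.drop ptr) cnt = bLoop rest rest.length s_n reach ptr cnt := by
  intro k
  induction k with
  | zero =>
    intro ptr hk s_n reach cnt
    have hdrop : rest.drop ptr = [] := List.drop_eq_nil_of_le (by omega)
    rw [aLoop.eq_def, bLoop.eq_def, hdrop]
    by_cases hlt : 2 * reach < s_n
    · have hadv : bAdvance rest rest.length (2 * reach) ptr = ptr := by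
        rw [bAdvance_eq, hdrop]; simp
      simp [hlt, hadv, aScan_spec]
    · simp [hlt]
  | succ k ih =>
    intro ptr hk s_n reach cnt
    rw [aLoop.eq_def, bLoop.eq_def]
    by_cases hlt : 2 * reach < s_n
    · simp only [if_pos hlt, aScan_spec]
      rw [filter_eq_takeWhile_of_sorted _ _ (hs.sublist (List.drop_sublist ptr rest))]
      set t := (rest.drop ptr).takeWhile (fun s => decide (s ≤ 2 * reach)) with ht_def
      have hadv : bAdvance rest rest.length (2 * reach) ptr = ptr + t.length :=
        bAdvance_eq rest (2 * reach) ptr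
      by_cases ht : t = []
      · simp [ht, hadv]
      · have htlen : 1 ≤ t.length := List.length_pos_of_ne_nil ht
        have hptr : ptr < rest.length := by
          by_contra hge
          rw [List.drop_eq_nil_of_le (by omega)] at ht_def
          simp [ht_def] at ht
        -- the count equals the prefix length
        have hcount : (rest.drop ptr).countP (fun s => decide (s ≤ 2 * reach)) = t.length := by
          rw [List.countP_eq_length_filter,
            filter_eq_takeWhile_of_sorted _ _ (hs.sublist (List.drop_sublist ptr rest))]
        -- A's max over the candidates is the last element of the prefix
        have hts : t.Pairwise (· ≤ ·) :=
          (hs.sublist (List.drop_sublist ptr rest)).sublist (List.takeWhile_sublist _)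
        obtain ⟨m, hm⟩ : ∃ m, PySem.List.max? t (fun x => x) = some m := by
          cases hmx : PySem.List.max? t (fun x => x) with
          | none => exact absurd ((PySem.List.max?_eq_none_iff _ _).mp hmx) ht
          | some m => exact ⟨m, rfl⟩
        have hmval : m = t.getLast ht := by
          refine le_antisymm ?_ ?_
          · exact le_getLast_of_sorted t hts ht m (PySem.List.max?_mem hm)
          · exact PySem.List.max?_isMax hm _ (List.getLast_mem ht)
        -- B's rest[j-1] is that same last element
        have hpre : t <+: rest.drop ptr := List.takeWhile_prefix _
        have htl : t.length ≤ (rest.drop ptr).length := hpre.length_le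
        have hgd : rest.getD (ptr + t.length - 1) 0 = t.getLast ht := by
          obtain ⟨suf, hsuf⟩ := hpre
          have h1 : t.length - 1 < t.length := by omega
          rw [List.getD_eq_getElem?_getD,
            show ptr + t.length - 1 = ptr + (t.length - 1) by omega,
            ← List.getElem?_drop, ← hsuf, List.getElem?_append_left h1,
            List.getElem?_eq_getElem h1]
          simp [List.getLast_eq_getElem]
        -- both loops recurse on the same state
        rw [hm, hadv]
        have hne' : ¬ ptr + t.length = ptr := by omega
        simp only [ht, if_neg hne', hmval, ← hgd]
        have hslice : PySem.List.slice (rest.drop ptr) (some ((t.length : Nat) : Int)) none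
            = rest.drop (ptr + t.length) := by
          rw [PySem.List.slice_from_natCast, List.drop_drop]
        rw [hcount, hslice, show ptr + t.length - 1 = ptr + (t.length - 1) by omega]
        exact ih (ptr + t.length) (by omega) s_n _ (cnt + 1)
    · simp [hlt]

-- ===== VERDICT (by name: the statement is the Claim_ definition above) =====
theorem find_min_domino_spec : Claim_equal_find_min_domino := by
  intro s_list _hdom hpre
  unfold Spec_find_min_domino
  cases s_list with
  | nil => exact absurd rfl hpre
  | cons a tl =>
    have hc : PySem.List.pyGet? (a :: tl) 0 = some a := PySem.List.pyGet?_zero_cons a tl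
    have hlast : PySem.List.pyGet? (a :: tl) (-1) = some ((a :: tl).getLast (by simp)) := by
      rw [PySem.List.pyGet?_neg_one]
      exact List.getLast?_eq_some_getLast (by simp)
    rw [find_min_domino, find_min_domino_alt, hc, hlast]
    simp only []
    have hsorted : (PySem.List.sorted (PySem.List.slice (a :: tl) (some 1) none)
        (fun x => x) false).Pairwise (· ≤ ·) := PySem.List.sorted_pairwise _ _
    have := loop_eq _ hsorted
      (PySem.List.sorted (PySem.List.slice (a :: tl) (some 1) none) (fun x => x) false).length
      0 (by omega) ((a :: tl).getLast (by simp)) a 2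
    simpa using this
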